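-- pv_equiv track=rewrite | github.com/codecontemplator/aoc2024 | day24/trash/day24p2.py | backtracking_distinct_groups2
-- ===== SOURCE A (Python) =====
-- from itertools import combinations
--
-- def backtracking_distinct_groups2(lst, group_size):
--     indices = range(len(lst))
--     all_pairs = list(combinations(indices, 2))
--     #results = []
--
--     def backtrack(group, start):
--         if len(group) == group_size:
--             yield group[:]
--             return
--
--         for i in range(start, len(all_pairs)):
--             pair = all_pairs[i]
--             # Ensure pair does not overlap with current group
--             if not any(set(pair) & set(p) for p in group):
--                 group.append(pair)
--                 yield from backtrack(group, i + 1)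
--                 group.pop()
--
--     return backtrack([], 0)
-- ===== SOURCE B (Python) =====
-- def backtracking_distinct_groups2(lst, group_size):
--     # B: pure divide-and-conquer over the candidate pair list instead of stateful
--     # backtracking: pick the head pair, narrow the remaining candidates to those
--     # disjoint from it, solve for k-1 pairs, and prepend the pair to each
--     # sub-result.  No group accumulator and no overlap test against the chosen
--     # group remain.  (A returns a lazy generator; B returns the same sequence
--     # of groups as a list.)
--     pairs = [(i, j) for i in range(len(lst)) for j in range(i + 1, len(lst))]
--
--     def solve(rest, k):
--         if k == 0:
--             return [[]]
--         out = []
--         while rest: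
--             p, rest = rest[0], rest[1:]
--             sub = [q for q in rest
--                    if p[0] != q[0] and p[0] != q[1] and p[1] != q[0] and p[1] != q[1]]
--             out += [[p] + g for g in solve(sub, k - 1)]
--         return out
--
--     return solve(pairs, group_size)
-- ===== Notes on version B (the rewrite author's own statement) =====
-- stated objective: alternative
-- what changed: B replaces A's stateful backtracking (mutable group stack, per-candidate disjointness scan over the current group, start index, generator) by a pure divide-and-conquer recursion on the candidate pair list: take the head pair, filter the remaining pairs once to those disjoint from it, solve for k-1 and prepend the pair to each sub-result; no group accumulator or overlap test against the group remains, and B returns the same sequence as a list where A returns a generator.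
import Mathlib
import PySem

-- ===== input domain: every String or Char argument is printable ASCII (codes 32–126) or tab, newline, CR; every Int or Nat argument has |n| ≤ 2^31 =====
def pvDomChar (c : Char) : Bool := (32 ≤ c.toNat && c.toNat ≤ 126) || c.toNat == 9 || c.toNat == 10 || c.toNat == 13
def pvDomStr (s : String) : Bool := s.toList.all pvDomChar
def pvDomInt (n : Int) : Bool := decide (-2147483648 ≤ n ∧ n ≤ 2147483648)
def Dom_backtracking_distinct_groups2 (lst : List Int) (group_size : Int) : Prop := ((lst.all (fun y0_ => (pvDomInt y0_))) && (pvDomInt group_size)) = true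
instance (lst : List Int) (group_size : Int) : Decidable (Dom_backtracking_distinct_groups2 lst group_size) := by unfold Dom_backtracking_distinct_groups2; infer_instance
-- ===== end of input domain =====

-- B is a pure divide-and-conquer recursion on the candidate pair list (filter the
-- tail to pairs disjoint from the head, recurse, prepend) instead of A's stateful
-- backtracking with a group stack and per-candidate overlap scan.  A returns a
-- lazy generator; the equivalence is about the sequence of yielded groups
-- (B returns that sequence as a list).

-- ===== PORT A =====
-- backtrack(group, start): the entry check `len(group) == group_size` and the
-- `for i in range(start, len(all_pairs))` loop, over the suffix `rest` of all_pairs.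
mutual
def btA (gs : Int) (group : List (Int × Int)) (rest : List (Int × Int)) :
    List (List (Int × Int)) :=
  if (group.length : Int) = gs then [group] else loopA gs group rest
termination_by (rest.length, 1)

def loopA (gs : Int) (group : List (Int × Int)) (rest : List (Int × Int)) :
    List (List (Int × Int)) :=
  match rest with
  | [] => []
  | p :: rs =>
      -- `if not any(set(pair) & set(p) for p in group)`
      (if group.all (fun q => !(p.1 == q.1 || p.1 == q.2 || p.2 == q.1 || p.2 == q.2)) then
        btA gs (group ++ [p]) rs
      else []) ++ loopA gs group rs
termination_by (rest.length, 0)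
end

-- all_pairs = list(combinations(range(len(lst)), 2)) : pairs (i,j), i<j, lexicographic
def backtracking_distinct_groups2 (lst : List Int) (group_size : Int) :
    List (List (Int × Int)) :=
  let all_pairs := (List.range lst.length).flatMap
    (fun i => (((List.range lst.length).drop (i+1)).map (fun j => ((i : Int), (j : Int)))))
  btA group_size [] all_pairs

-- ===== PORT B =====
-- `p[0] != q[0] and p[0] != q[1] and p[1] != q[0] and p[1] != q[1]`
def disjB (p q : Int × Int) : Bool :=
  !(p.1 == q.1) && !(p.1 == q.2) && !(p.2 == q.1) && !(p.2 == q.2)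

mutual
-- solve(rest, k): the `if k == 0` base case, then the while loop (= goB).
def solveB (k : Int) (rest : List (Int × Int)) : List (List (Int × Int)) :=
  if k = 0 then [[]] else goB k rest
termination_by (rest.length, 1)
decreasing_by
  exact Prod.Lex.right' _ (by omega) (by omega)

-- the `while rest:` loop: pop the head p, filter the tail, recurse, prepend p.
def goB (k : Int) (rest : List (Int × Int)) : List (List (Int × Int)) :=
  match rest with
  | [] => []
  | p :: rs =>
      ((solveB (k - 1) (rs.filter (fun q => disjB p q))).map (fun g => p :: g))
        ++ goB k rs
termination_by (rest.length, 0)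
decreasing_by
  · exact Prod.Lex.left _ _ (Nat.lt_succ_of_le (List.length_filter_le _ _))
  · exact Prod.Lex.left _ _ (by simp)
end

-- pairs = [(i, j) for i in range(len(lst)) for j in range(i+1, len(lst))]
def backtracking_distinct_groups2_alt (lst : List Int) (group_size : Int) :
    List (List (Int × Int)) :=
  let pairs := (List.range lst.length).flatMap
    (fun i => (((List.range lst.length).drop (i+1)).map (fun j => ((i : Int), (j : Int)))))
  solveB group_size pairs

-- ===== PRECONDITION & SPEC =====
def Spec_backtracking_distinct_groups2 (lst : List Int) (group_size : Int) (out : List (List (Int × Int))) : Prop := out = backtracking_distinct_groups2_alt lst group_size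
instance (lst : List Int) (group_size : Int) (out : List (List (Int × Int))) : Decidable (Spec_backtracking_distinct_groups2 lst group_size out) := by unfold Spec_backtracking_distinct_groups2; infer_instance

-- ===== CLAIM (what is proved, stated in full; the proofs are below) =====
def Claim_equal_backtracking_distinct_groups2 : Prop := ∀ (lst : List Int) (group_size : Int), Dom_backtracking_distinct_groups2 lst group_size → Spec_backtracking_distinct_groups2 lst group_size (backtracking_distinct_groups2 lst group_size)

-- ===== LEMMAS AND PROOFS =====

-- A's disjointness check of p against the whole current group
def okA (group : List (Int × Int)) (p : Int × Int) : Bool :=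
  group.all (fun q => !(p.1 == q.1 || p.1 == q.2 || p.2 == q.1 || p.2 == q.2))

lemma okA_append (group : List (Int × Int)) (p q : Int × Int) :
    okA (group ++ [p]) q = (okA group q && disjB p q) := by
  simp only [okA, disjB, List.all_append, List.all_cons, List.all_nil, Bool.and_true]
  rw [Bool.eq_iff_iff]
  simp only [Bool.and_eq_true, Bool.not_eq_true', Bool.or_eq_false_iff, beq_eq_false_iff_ne,
    ne_eq]
  constructor
  · rintro ⟨h1, ⟨⟨⟨a, b⟩, c⟩, d⟩⟩
    exact ⟨h1, ⟨⟨fun e => a e.symm, fun e => c e.symm⟩, fun e => b e.symm⟩, fun e => d e.symm⟩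
  · rintro ⟨h1, ⟨⟨⟨a, c⟩, b⟩, d⟩⟩
    exact ⟨h1, ⟨⟨fun e => a e.symm, fun e => b e.symm⟩, fun e => c e.symm⟩, fun e => d e.symm⟩

-- the key correspondence: A from state (group, rest) equals B on the pre-filtered
-- candidate list, with the finished group prefix prepended to every sub-result
lemma btA_eq_solveB (gs : Int) (rest : List (Int × Int)) :
    ∀ group, btA gs group rest =
      (solveB (gs - group.length) (rest.filter (okA group))).map (fun g => group ++ g) := by
  induction rest with
  | nil =>
    intro group
    rw [btA, solveB]
    by_cases h : (group.length : Int) = gs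
    · rw [if_pos h, if_pos (by omega)]; simp
    · rw [if_neg h, if_neg (by omega)]
      simp [loopA, goB]
  | cons p rs ih =>
    intro group
    rw [btA]
    by_cases h : (group.length : Int) = gs
    · rw [if_pos h, solveB, if_pos (by omega)]; simp
    · rw [if_neg h, loopA]
      show (if okA group p then btA gs (group ++ [p]) rs else []) ++ loopA gs group rs = _
      have hloop : loopA gs group rs =
          (solveB (gs - group.length) (rs.filter (okA group))).map (fun g => group ++ g) := by
        have := ih group
        rw [btA, if_neg h] at this
        rw [this, solveB, if_neg (by omega)]
      rw [List.filter_cons]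
      by_cases hp : okA group p = true
      · rw [if_pos hp, if_pos hp, solveB, if_neg (by omega), goB]
        have hgo : goB (gs - group.length) (rs.filter (okA group)) =
            solveB (gs - group.length) (rs.filter (okA group)) := by
          rw [solveB, if_neg (by omega)]
        have hfil : rs.filter (okA (group ++ [p]))
            = (rs.filter (okA group)).filter (fun q => disjB p q) := by
          rw [List.filter_filter]
          apply List.filter_congr
          intro q _
          rw [okA_append, Bool.and_comm]
        have hk : gs - ((group ++ [p]).length : Int) = gs - group.length - 1 := by
          simp; omega
        rw [ih (group ++ [p]), hfil, hk, hloop, hgo, List.map_append]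
        congr 1
        rw [List.map_map]
        apply List.map_congr_left
        intro g _
        simp
      · rw [if_neg hp, if_neg hp, hloop]
        simp

-- ===== VERDICT (by name: the statement is the Claim_ definition above) =====
theorem backtracking_distinct_groups2_spec : Claim_equal_backtracking_distinct_groups2 := by
  intro lst gs _
  unfold Spec_backtracking_distinct_groups2
  unfold backtracking_distinct_groups2 backtracking_distinct_groups2_alt
  rw [btA_eq_solveB gs _ []]
  have hf : ∀ L : List (Int × Int), L.filter (okA []) = L :=
    fun L => List.filter_eq_self.mpr (fun _ _ => by simp [okA])
  rw [hf]
  simp
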